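-- pv_equiv track=rewrite | github.com/Bittermun/AICampTownDebate-CTD | src/benchmark/datasets.py | _resolve_split
-- ===== SOURCE A (Python) =====
-- from typing import Any, Dict, List, Tuple
--
-- def _resolve_split(requested_split: str | None, available: List[str]) -> str:
--     if not available:
--         raise RuntimeError("No splits available in HuggingFace dataset.")
--     if requested_split and requested_split in available:
--         return requested_split
--     if requested_split and "_or_" in requested_split:
--         for token in requested_split.split("_or_"):
--             token = token.strip()
--             if token in available:
--                 return token
--     for preferred in ("test", "validation", "train"):
--         if preferred in available:
--             return preferred
--     return available[0]
-- ===== SOURCE B (Python) =====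
-- def _resolve_split(requested_split, available):
--     if not available:
--         raise RuntimeError("No splits available in HuggingFace dataset.")
--     prio = []
--     if requested_split:
--         prio.append(requested_split)
--         if "_or_" in requested_split:
--             prio += [t.strip() for t in requested_split.split("_or_")]
--     prio += ["test", "validation", "train"]
--     # one argmin pass over `available`: lowest priority rank wins, ties broken
--     # by position in `available`; names outside `prio` rank last, so if nothing
--     # matches the first available split wins.
--     return min(available, key=lambda s: prio.index(s) if s in prio else len(prio))
-- ===== Notes on version B (the rewrite author's own statement) =====
-- stated objective: alternative
-- what changed: Inverts the iteration: instead of A's cascade that scans candidate names testing membership in `available`, B makes a single argmin pass over `available` itself, keyed by each split's rank in a priority list (unranked names rank last, so the stable min falls back to available[0]).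
import Mathlib
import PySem

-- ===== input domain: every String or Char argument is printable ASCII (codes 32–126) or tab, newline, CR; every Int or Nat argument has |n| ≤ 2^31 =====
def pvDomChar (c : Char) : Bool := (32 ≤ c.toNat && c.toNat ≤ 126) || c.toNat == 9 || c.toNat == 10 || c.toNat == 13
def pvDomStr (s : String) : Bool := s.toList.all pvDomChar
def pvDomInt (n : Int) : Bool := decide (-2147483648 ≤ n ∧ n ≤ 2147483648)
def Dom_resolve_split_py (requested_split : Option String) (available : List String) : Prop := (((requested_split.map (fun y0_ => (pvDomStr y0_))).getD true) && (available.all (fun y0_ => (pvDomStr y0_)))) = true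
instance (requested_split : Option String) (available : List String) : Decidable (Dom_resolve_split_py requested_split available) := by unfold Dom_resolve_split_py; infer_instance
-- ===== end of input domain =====

-- B replaces A's cascade of candidate scans against `available` by one argmin pass over
-- `available` keyed by a priority rank; same return value, a different traversal.

-- ===== PORT A =====
-- the 'for token in …' loop of A: returns the first stripped token found in available
def pvLoopTokens (available : List String) : List String → Option String
  | [] => none
  | t :: rest =>
    let tok := PySem.Str.strip t
    if available.contains tok then some tok else pvLoopTokens available rest

-- the 'for preferred in ("test","validation","train")' loop of A
def pvLoopPreferred (available : List String) : List String → Option String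
  | [] => none
  | p :: rest => if available.contains p then some p else pvLoopPreferred available rest

def resolve_split_py (requested_split : Option String) (available : List String) : String :=
  -- 'if not available: raise RuntimeError' is excluded by Pre_
  let truthy : Bool := match requested_split with | none => false | some s => decide (s ≠ "")
  let r := requested_split.getD ""
  if truthy && available.contains r then r
  else
    match (if truthy && PySem.Str.isIn "_or_" r then
             pvLoopTokens available (((PySem.Str.split? r "_or_").getD []))
           else none) with
    | some t => t
    | none =>
      match pvLoopPreferred available ["test", "validation", "train"] with
      | some p => p
      | none => available.headD ""   -- available[0]; only reached with available ≠ []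

-- ===== PORT B =====
-- Source B's key: 'prio.index(s) if s in prio else len(prio)'
def pvRank (prio : List String) (s : String) : Nat :=
  if prio.contains s then
    match PySem.List.index? prio s with
    | some i => i
    | none => prio.length   -- unreachable under the contains guard
  else prio.length

def resolve_split_py_alt (requested_split : Option String) (available : List String) : String :=
  -- empty available raises (excluded by Pre_)
  let prio : List String :=
    (match requested_split with
     | none => []
     | some r =>
       if r ≠ "" then
         r :: (if PySem.Str.isIn "_or_" r then
                 (((PySem.Str.split? r "_or_").getD [])).map PySem.Str.strip
               else [])
       else []) ++ ["test", "validation", "train"]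
  -- min(available, key=…); available ≠ [] under Pre_, so min? is some
  (PySem.List.min? available (fun s => pvRank prio s)).getD ""

-- ===== PRECONDITION & SPEC =====
-- A raises RuntimeError exactly when available is empty; those inputs are excluded.
def Pre_resolve_split_py (requested_split : Option String) (available : List String) : Prop :=
  available ≠ []
instance (_requested_split : Option String) (available : List String) : Decidable (Pre_resolve_split_py _requested_split available) := by unfold Pre_resolve_split_py; infer_instance
def pvWitness_resolve_split_py : Option String × List String := (some "test", ["train", "test"])

def Spec_resolve_split_py (requested_split : Option String) (available : List String) (out : String) : Prop := out = resolve_split_py_alt requested_split available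
instance (requested_split : Option String) (available : List String) (out : String) : Decidable (Spec_resolve_split_py requested_split available out) := by unfold Spec_resolve_split_py; infer_instance

-- ===== CLAIM (what is proved, stated in full; the proofs are below) =====
def Claim_equal_resolve_split_py : Prop := ∀ (requested_split : Option String) (available : List String), Dom_resolve_split_py requested_split available → Pre_resolve_split_py requested_split available → Spec_resolve_split_py requested_split available (resolve_split_py requested_split available)

-- ===== LEMMAS AND PROOFS =====

-- A's token loop is a first-match over the stripped tokens
theorem pvLoopTokens_eq_find (available ts : List String) :
    pvLoopTokens available ts = (ts.map PySem.Str.strip).find? (fun c => available.contains c) := by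
  induction ts with
  | nil => rfl
  | cons t rest ih =>
    simp only [pvLoopTokens, List.map_cons, List.find?_cons]
    by_cases h : PySem.Str.strip t ∈ available <;> simp [h, ih]

-- A's preferred loop is a first-match
theorem pvLoopPreferred_eq_find (available ps : List String) :
    pvLoopPreferred available ps = ps.find? (fun c => available.contains c) := by
  induction ps with
  | nil => rfl
  | cons p rest ih =>
    simp only [pvLoopPreferred, List.find?_cons]
    by_cases h : p ∈ available <;> simp [h, ih]

-- min?'s fold keeps the accumulator under a constant key
theorem pv_min_fold_const {α : Type} (t : List α) (m : α) (c : Nat) :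
    t.foldl (fun acc x => match acc with
      | none => some x
      | some m' => if (fun _ => c) x < (fun _ => c) m' then some x else some m') (some m) = some m := by
  induction t generalizing m with
  | nil => rfl
  | cons y t ih => simpa using ih m

-- min? under a constant key returns the first element
theorem pv_min_const {α : Type} (xs : List α) (hx : xs ≠ []) (c : Nat) (d : α) :
    PySem.List.min? xs (fun _ => c) = some (xs.headD d) := by
  cases xs with
  | nil => exact absurd rfl hx
  | cons x t =>
    simp only [PySem.List.min?, List.foldl_cons, List.headD_cons]
    exact pv_min_fold_const t x c

-- min?'s fold only compares keys: keys agreeing in order on the visited elements give the same result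
theorem pv_min_fold_congr {α : Type} (k1 k2 : α → Nat)
    (t : List α) (m : α)
    (h : ∀ a, (a ∈ t ∨ a = m) → ∀ b, (b ∈ t ∨ b = m) → (k1 a < k1 b ↔ k2 a < k2 b)) :
    t.foldl (fun acc x => match acc with
      | none => some x
      | some m' => if k1 x < k1 m' then some x else some m') (some m)
    = t.foldl (fun acc x => match acc with
      | none => some x
      | some m' => if k2 x < k2 m' then some x else some m') (some m) := by
  induction t generalizing m with
  | nil => rfl
  | cons y t ih =>
    have hy : k1 y < k1 m ↔ k2 y < k2 m :=
      h y (Or.inl (List.mem_cons_self)) m (Or.inr rfl)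
    simp only [List.foldl_cons]
    by_cases h1 : k1 y < k1 m
    · rw [if_pos h1, if_pos (hy.mp h1)]
      exact ih y (fun a ha b hb => h a (by rcases ha with ha | ha; exact Or.inl (List.mem_cons_of_mem _ ha); exact Or.inl (ha ▸ List.mem_cons_self)) b (by rcases hb with hb | hb; exact Or.inl (List.mem_cons_of_mem _ hb); exact Or.inl (hb ▸ List.mem_cons_self)))
    · rw [if_neg h1, if_neg (fun hc => h1 (hy.mpr hc))]
      exact ih m (fun a ha b hb => h a (by rcases ha with ha | ha; exact Or.inl (List.mem_cons_of_mem _ ha); exact Or.inr ha) b (by rcases hb with hb | hb; exact Or.inl (List.mem_cons_of_mem _ hb); exact Or.inr hb))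

theorem pv_min_congr {α : Type} (k1 k2 : α → Nat) (xs : List α)
    (h : ∀ a ∈ xs, ∀ b ∈ xs, (k1 a < k1 b ↔ k2 a < k2 b)) :
    PySem.List.min? xs k1 = PySem.List.min? xs k2 := by
  cases xs with
  | nil => rfl
  | cons x t =>
    simp only [PySem.List.min?, List.foldl_cons]
    exact pv_min_fold_congr k1 k2 t x (fun a ha b hb =>
      h a (by rcases ha with ha | ha; exact List.mem_cons_of_mem _ ha; exact ha ▸ List.mem_cons_self)
        b (by rcases hb with hb | hb; exact List.mem_cons_of_mem _ hb; exact hb ▸ List.mem_cons_self))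

-- pvRank on a cons
theorem pvRank_nil (s : String) : pvRank [] s = 0 := rfl

theorem pvRank_cons (p : String) (rest : List String) (s : String) :
    pvRank (p :: rest) s = if s = p then 0 else pvRank rest s + 1 := by
  by_cases hsp : s = p
  · subst hsp
    simp [pvRank, PySem.List.index?_eq_idxOf?, List.idxOf?_cons]
  · have hbe : (p == s) = false := by simp [Ne.symm hsp]
    by_cases hmem : s ∈ rest
    · cases hidx : List.idxOf? s rest with
      | none => exact absurd (List.idxOf?_eq_none_iff.mp hidx) (by simpa using hmem)
      | some i =>
        simp [pvRank, hsp, hmem, List.contains_eq_mem, PySem.List.index?_eq_idxOf?,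
          List.idxOf?_cons, hbe, hidx]
    · simp [pvRank, hsp, hmem, List.contains_eq_mem]

-- the argmin over `available` keyed by rank IS the first-match over the priority list
theorem pv_min_rank_eq_find (prio : List String) (xs : List String) (hx : xs ≠ []) :
    PySem.List.min? xs (fun s => pvRank prio s)
      = some ((prio.find? (fun c => xs.contains c)).getD (xs.headD "")) := by
  induction prio with
  | nil =>
    simp only [List.find?_nil, Option.getD_none]
    have : (fun s => pvRank [] s) = (fun _ : String => 0) := by
      funext s; exact pvRank_nil s
    rw [this]
    exact pv_min_const xs hx 0 ""
  | cons p rest ih =>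
    by_cases hp : p ∈ xs
    · -- p is in xs: it has rank 0, the unique minimum; min? returns it
      simp only [List.find?_cons, List.contains_eq_mem, hp, decide_true, Option.getD_some]
      rcases hm : PySem.List.min? xs (fun s => pvRank (p :: rest) s) with _ | m
      · exact absurd ((PySem.List.min?_eq_none_iff _ _).mp hm) hx
      · have hmem := PySem.List.min?_mem hm
        have hmin := PySem.List.min?_isMin hm p hp
        have hzero : pvRank (p :: rest) p = 0 := by rw [pvRank_cons]; simp
        rw [hzero] at hmin
        have : pvRank (p :: rest) m = 0 := Nat.le_zero.mp hmin
        rw [pvRank_cons] at this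
        by_cases hmp : m = p
        · rw [hmp]
        · rw [if_neg hmp] at this; omega
    · -- p is not in xs: the rank of every element of xs is 1 + its rank in rest
      simp only [List.find?_cons, List.contains_eq_mem, hp, decide_false]
      rw [pv_min_congr (fun s => pvRank (p :: rest) s) (fun s => pvRank rest s) xs
        (fun a ha b hb => by
          have hap : a ≠ p := fun h => hp (h ▸ ha)
          have hbp : b ≠ p := fun h => hp (h ▸ hb)
          simp only [pvRank_cons, hap, hbp, if_false]
          omega)]
      simpa [List.contains_eq_mem] using ih

-- B's result as a first-match over the priority list (proof-side normal form)
def pvPrio (rs : Option String) : List String :=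
  (match rs with
   | none => []
   | some r =>
     if r ≠ "" then
       r :: (if PySem.Str.isIn "_or_" r then
               (((PySem.Str.split? r "_or_").getD [])).map PySem.Str.strip
             else [])
     else []) ++ ["test", "validation", "train"]

theorem pv_alt_eq_find (rs : Option String) (available : List String) (hpre : available ≠ []) :
    resolve_split_py_alt rs available
      = ((pvPrio rs).find? (fun c => available.contains c)).getD (available.headD "") := by
  show (PySem.List.min? available (fun s => pvRank (pvPrio rs) s)).getD "" = _
  rw [pv_min_rank_eq_find _ _ hpre]
  rfl

-- ===== VERDICT (by name: the statement is the Claim_ definition above) =====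
theorem resolve_split_py_spec : Claim_equal_resolve_split_py := by
  intro rs available _ hpre
  unfold Spec_resolve_split_py resolve_split_py
  rw [pv_alt_eq_find rs available hpre]
  unfold pvPrio
  rcases hfp : List.find? (fun c => decide (c ∈ available)) ["test", "validation", "train"]
    with _ | p <;>
  (cases rs with
  | none => simp [pvLoopPreferred_eq_find, hfp]
  | some r =>
    by_cases hr : r = ""
    · subst hr
      simp [pvLoopPreferred_eq_find, hfp]
    · simp only [Option.getD, hr, ne_eq, not_false_iff, decide_true, Bool.true_and, if_pos]
      by_cases hin : r ∈ available
      · simp [hin, List.find?_cons]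
      · by_cases hor : PySem.Chars.isIn ['_', 'o', 'r', '_'] r.toList = true
        · rcases htok : pvLoopTokens available ((PySem.Str.split? r "_or_").getD []) with _ | t <;>
            rw [pvLoopTokens_eq_find] at htok <;>
            simp only [List.contains_eq_mem, List.find?_map, Option.getD] at htok <;>
            simp [hin, hor, htok, pvLoopTokens_eq_find, pvLoopPreferred_eq_find, hfp,
              List.find?_append, List.find?_map, List.find?_cons]
        · simp [hin, hor, pvLoopPreferred_eq_find, hfp, List.find?_append, List.find?_cons])
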